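-- pv_equiv track=rewrite | github.com/khive-ai/khive.d | src/khive/services/plan/planner_service.py | _assign_agents_to_phase
-- ===== SOURCE A (Python) =====
-- def _assign_agents_to_phase(
--
--     phase_info: dict,
--     agent_recommendations: list,
--     phase_index: int,
--     total_phases: int,
-- ) -> list:
--     """Distribute LLM-recommended agents across phases based on phase characteristics."""
--
--     # Respect the LLM's intelligent role/domain recommendations
--     # Just distribute them appropriately across phases
--
--     total_agents = len(agent_recommendations)
--
--     # For single phase, use all agents (up to reasonable limit)
--     if total_phases == 1:
--         return agent_recommendations[: min(8, total_agents)]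
--
--     # Calculate base distribution and remainder
--     base_agents_per_phase = total_agents // total_phases
--     remainder = total_agents % total_phases
--
--     # Determine agents for this specific phase
--     # Earlier phases get +1 agent if there's remainder
--     agents_for_this_phase = base_agents_per_phase + (
--         1 if phase_index < remainder else 0
--     )
--
--     # Ensure at least 1 agent per phase, max 6 agents per phase
--     agents_for_this_phase = max(1, min(6, agents_for_this_phase))
--
--     # Calculate start and end indices for this phase
--     # Account for earlier phases potentially having +1 agent
--     start_idx = 0
--     for i in range(phase_index):
--         phase_agent_count = base_agents_per_phase + (1 if i < remainder else 0)
--         start_idx += phase_agent_count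
--
--     end_idx = min(start_idx + agents_for_this_phase, total_agents)
--
--     # Extract agents for this phase
--     phase_agents = agent_recommendations[start_idx:end_idx]
--
--     # Safety check - if somehow we have no agents, take at least one
--     if not phase_agents and agent_recommendations:
--         phase_agents = [agent_recommendations[phase_index % total_agents]]
--
--     return phase_agents
-- ===== SOURCE B (Python) =====
-- def _assign_agents_to_phase(
--     phase_info: dict,
--     agent_recommendations: list,
--     phase_index: int,
--     total_phases: int,
-- ) -> list:
--     """Closed-form chunk extraction: no per-phase accumulation loop."""
--     n = len(agent_recommendations)
--     if total_phases == 1: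
--         return agent_recommendations[:8]
--     base, rem = divmod(n, total_phases)
--     count = min(6, max(1, base + (1 if phase_index < rem else 0)))
--     i = max(phase_index, 0)
--     start = base * i + min(i, max(rem, 0))
--     chunk = agent_recommendations[start : min(start + count, n)]
--     if chunk:
--         return chunk
--     return [agent_recommendations[phase_index % n]] if agent_recommendations else []
-- ===== Notes on version B (the rewrite author's own statement) =====
-- stated objective: alternative
-- what changed: Replaces A's O(phase_index) loop that sums earlier phases' sizes with a closed-form start index base*max(phase_index,0) + min(max(phase_index,0), max(remainder,0)), computed via a single divmod and guard-free clamps.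
import Mathlib
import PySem

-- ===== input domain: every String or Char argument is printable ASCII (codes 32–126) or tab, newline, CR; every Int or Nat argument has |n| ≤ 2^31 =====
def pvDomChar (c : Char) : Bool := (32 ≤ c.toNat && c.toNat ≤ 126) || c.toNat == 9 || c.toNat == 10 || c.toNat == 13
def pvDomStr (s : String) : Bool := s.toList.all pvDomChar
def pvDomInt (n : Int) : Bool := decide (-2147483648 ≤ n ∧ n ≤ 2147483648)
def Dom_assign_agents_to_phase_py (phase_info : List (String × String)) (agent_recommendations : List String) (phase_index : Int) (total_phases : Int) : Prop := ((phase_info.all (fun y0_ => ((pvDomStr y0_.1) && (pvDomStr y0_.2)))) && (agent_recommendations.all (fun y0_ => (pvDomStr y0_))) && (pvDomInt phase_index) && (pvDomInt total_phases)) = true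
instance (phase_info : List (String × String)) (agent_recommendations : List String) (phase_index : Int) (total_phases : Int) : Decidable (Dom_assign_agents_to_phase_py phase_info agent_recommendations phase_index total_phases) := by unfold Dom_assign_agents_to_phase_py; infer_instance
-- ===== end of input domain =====

-- B replaces A's accumulation loop for start_idx with the closed form
-- base*max(phase_index,0) + min(max(phase_index,0), max(remainder,0))  (objective: alternative).

-- ===== PORT A =====
def assign_agents_to_phase_py (phase_info : List (String × String)) (agent_recommendations : List String) (phase_index : Int) (total_phases : Int) : List String :=
  let total_agents : Int := agent_recommendations.length
  if total_phases = 1 then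
    PySem.List.slice agent_recommendations none (some (min 8 total_agents))
  else
    let base_agents_per_phase := PySem.Int.floordiv total_agents total_phases
    let remainder := PySem.Int.mod total_agents total_phases
    let agents_for_this_phase := base_agents_per_phase + (if phase_index < remainder then 1 else 0)
    let agents_for_this_phase := max 1 (min 6 agents_for_this_phase)
    -- the start_idx accumulation loop over range(phase_index)
    let start_idx := (PySem.List.pyRange 0 phase_index 1).foldl
      (fun acc i => acc + (base_agents_per_phase + (if i < remainder then 1 else 0))) 0
    let end_idx := min (start_idx + agents_for_this_phase) total_agents
    let phase_agents := PySem.List.slice agent_recommendations (some start_idx) (some end_idx)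
    if phase_agents = [] ∧ agent_recommendations ≠ [] then
      -- index phase_index % total_agents is always in range here (total_agents > 0), so pyGetD is exact
      [PySem.List.pyGetD agent_recommendations (PySem.Int.mod phase_index total_agents) ""]
    else
      phase_agents

-- ===== PORT B =====
-- closed-form start of chunk i of the front-loaded partition (0 for i ≤ 0)
def chunkStart (base rem i : Int) : Int :=
  base * max i 0 + min (max i 0) (max rem 0)

def assign_agents_to_phase_py_alt (phase_info : List (String × String)) (agent_recommendations : List String) (phase_index : Int) (total_phases : Int) : List String :=
  let n : Int := agent_recommendations.length
  if total_phases = 1 then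
    PySem.List.slice agent_recommendations none (some 8)
  else
    match PySem.Int.divmod? n total_phases with
    | none => []  -- unreachable under Pre_ (total_phases ≠ 0); Python's divmod raises here
    | some (base, rem) =>
      let count := min 6 (max 1 (base + (if phase_index < rem then 1 else 0)))
      let start := chunkStart base rem phase_index
      let chunk := PySem.List.slice agent_recommendations (some start) (some (min (start + count) n))
      if chunk.isEmpty then
        if agent_recommendations = [] then []
        else [PySem.List.pyGetD agent_recommendations (PySem.Int.mod phase_index n) ""]
      else chunk

-- ===== PRECONDITION & SPEC =====
-- Pre_ excludes exactly total_phases = 0, where Python A raises ZeroDivisionError (B raises there too).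
def Pre_assign_agents_to_phase_py (phase_info : List (String × String)) (agent_recommendations : List String) (phase_index : Int) (total_phases : Int) : Prop := total_phases ≠ 0
instance (phase_info : List (String × String)) (agent_recommendations : List String) (phase_index : Int) (total_phases : Int) : Decidable (Pre_assign_agents_to_phase_py phase_info agent_recommendations phase_index total_phases) := by unfold Pre_assign_agents_to_phase_py; infer_instance
def pvWitness_assign_agents_to_phase_py : (List (String × String)) × List String × Int × Int := ([("k", "v")], ["a", "b", "c"], 1, 2)
def Spec_assign_agents_to_phase_py (phase_info : List (String × String)) (agent_recommendations : List String) (phase_index : Int) (total_phases : Int) (out : List String) : Prop := out = assign_agents_to_phase_py_alt phase_info agent_recommendations phase_index total_phases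
instance (phase_info : List (String × String)) (agent_recommendations : List String) (phase_index : Int) (total_phases : Int) (out : List String) : Decidable (Spec_assign_agents_to_phase_py phase_info agent_recommendations phase_index total_phases out) := by unfold Spec_assign_agents_to_phase_py; infer_instance

-- ===== CLAIM =====
def Claim_equal_assign_agents_to_phase_py : Prop := ∀ (phase_info : List (String × String)) (agent_recommendations : List String) (phase_index : Int) (total_phases : Int), Dom_assign_agents_to_phase_py phase_info agent_recommendations phase_index total_phases → Pre_assign_agents_to_phase_py phase_info agent_recommendations phase_index total_phases → Spec_assign_agents_to_phase_py phase_info agent_recommendations phase_index total_phases (assign_agents_to_phase_py phase_info agent_recommendations phase_index total_phases)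

-- ===== LEMMAS AND PROOFS =====

-- A's accumulation loop in closed form (over Nat lengths, by induction).
theorem startIdx_loop_nat (base rem : Int) (n : Nat) :
    (PySem.List.pyRange 0 (n : Int) 1).foldl
      (fun acc i => acc + (base + (if i < rem then 1 else 0))) 0
    = base * n + max 0 (min (n : Int) rem) := by
  induction n with
  | zero =>
    rw [PySem.List.pyRange_one_eq_nil (by omega)]
    simp only [List.foldl_nil, Nat.cast_zero]
    omega
  | succ m ih =>
    rw [show ((m + 1 : Nat) : Int) = (m : Int) + 1 by push_cast; ring,
        PySem.List.pyRange_one_succ_right (by positivity), List.foldl_append, ih]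
    simp only [List.foldl]
    have hb : base * ((m : Int) + 1) = base * (m : Int) + base := by ring
    rw [hb]
    split_ifs with hlt <;> omega

-- A's loop equals B's closed-form chunkStart, for every (possibly negative) phase_index.
theorem startIdx_loop (base rem pi : Int) :
    (PySem.List.pyRange 0 pi 1).foldl
      (fun acc i => acc + (base + (if i < rem then 1 else 0))) 0
    = chunkStart base rem pi := by
  unfold chunkStart
  by_cases hp : 0 < pi
  · obtain ⟨n, rfl⟩ : ∃ n : Nat, pi = (n : Int) := ⟨pi.toNat, (Int.toNat_of_nonneg (le_of_lt hp)).symm⟩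
    rw [startIdx_loop_nat, show max (n : Int) 0 = (n : Int) by omega]
    have : max 0 (min (n : Int) rem) = min (n : Int) (max rem 0) := by omega
    rw [this]
  · rw [PySem.List.pyRange_one_eq_nil (by omega)]
    simp only [List.foldl_nil]
    rw [show max pi 0 = 0 by omega]
    omega

-- ===== VERDICT =====
theorem assign_agents_to_phase_py_spec : Claim_equal_assign_agents_to_phase_py := by
  intro phase_info ag pi tp _ htp
  unfold Pre_assign_agents_to_phase_py at htp
  unfold Spec_assign_agents_to_phase_py assign_agents_to_phase_py assign_agents_to_phase_py_alt
  by_cases h1 : tp = 1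
  · simp only [h1, reduceIte]
    rw [PySem.List.slice_to ag (b := min 8 (ag.length : Int)) (by omega),
        PySem.List.slice_to ag (b := 8) (by omega)]
    have h8 : ((8 : Int)).toNat = 8 := rfl
    have : (min 8 (ag.length : Int)).toNat = min 8 ag.length := by omega
    rw [this, h8, ← List.take_take, List.take_length]
  · simp only [h1, if_false]
    have hd : PySem.Int.divmod? (ag.length : Int) tp
        = some (PySem.Int.floordiv (ag.length : Int) tp, PySem.Int.mod (ag.length : Int) tp) := by
      simp [PySem.Int.divmod?, PySem.Int.floordiv, PySem.Int.mod, htp]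
    rw [hd]
    simp only
    rw [startIdx_loop]
    have hc : max 1 (min 6 (PySem.Int.floordiv (ag.length : Int) tp + (if pi < PySem.Int.mod (ag.length : Int) tp then 1 else 0)))
        = min 6 (max 1 (PySem.Int.floordiv (ag.length : Int) tp + (if pi < PySem.Int.mod (ag.length : Int) tp then 1 else 0))) := by
      omega
    rw [hc]
    set chunk := PySem.List.slice ag (some (chunkStart (PySem.Int.floordiv (ag.length : Int) tp) (PySem.Int.mod (ag.length : Int) tp) pi)) (some (min (chunkStart (PySem.Int.floordiv (ag.length : Int) tp) (PySem.Int.mod (ag.length : Int) tp) pi + min 6 (max 1 (PySem.Int.floordiv (ag.length : Int) tp + (if pi < PySem.Int.mod (ag.length : Int) tp then 1 else 0)))) (ag.length : Int))) with hch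
    by_cases hce : chunk = []
    · by_cases hag : ag = [] <;> simp [hce, hag]
    · simp [List.isEmpty_iff, hce]
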